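-- pv_equiv track=rewrite | github.com/TrueJacobG/python | PROJEKTY/19_yield/main.py | parzyste
-- ===== SOURCE A (Python) =====
-- def parzyste(x):
--     j = 0
--     while j < x:
--         if j % 2 == 0:
--             yield j
--         if j % 2 != 0:
--             yield j-1
--         j += 1
-- ===== SOURCE B (Python) =====
-- def parzyste(x):
--     count = 0
--     k = 0
--     while count < x:
--         yield k
--         count += 1
--         if count < x:
--             yield k
--             count += 1
--         k += 2
-- ===== Notes on version B (the rewrite author's own statement) =====
-- stated objective: alternative
-- what changed: Instead of iterating index j and branching on its parity each step, B iterates over even values k, emitting each k twice under a count<x cap, so the parity test disappears.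
import Mathlib
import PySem

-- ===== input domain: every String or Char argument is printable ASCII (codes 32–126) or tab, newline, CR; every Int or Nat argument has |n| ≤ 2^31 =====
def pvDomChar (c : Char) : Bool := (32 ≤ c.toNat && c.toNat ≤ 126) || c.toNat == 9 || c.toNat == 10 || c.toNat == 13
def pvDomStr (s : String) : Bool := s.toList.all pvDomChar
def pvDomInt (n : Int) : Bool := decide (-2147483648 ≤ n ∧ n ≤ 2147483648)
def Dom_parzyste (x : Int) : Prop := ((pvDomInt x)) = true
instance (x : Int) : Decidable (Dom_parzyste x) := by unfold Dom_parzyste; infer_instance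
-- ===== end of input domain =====

-- B iterates over even values k, yielding each twice under a count < x cap, instead of
-- A's index loop with a parity branch; objective: alternative (same cost, different loop).

-- ===== PORT A =====
-- while j < x: if j even yield j; if j odd yield j-1; j += 1
def parzysteGo (x j : Int) : List Int :=
  if _h : j < x then
    ((if j % 2 == 0 then [j] else []) ++ (if j % 2 != 0 then [j - 1] else []))
      ++ parzysteGo x (j + 1)
  else []
termination_by (x - j).toNat
decreasing_by omega

def parzyste (x : Int) : List Int := parzysteGo x 0

-- ===== PORT B =====
-- while count < x: yield k; count += 1; if count < x: yield k; count += 1; k += 2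
def parzysteAltGo (x count k : Int) : List Int :=
  if _h : count < x then
    k :: (if _h2 : count + 1 < x then k :: parzysteAltGo x (count + 2) (k + 2)
          else parzysteAltGo x (count + 1) (k + 2))
  else []
termination_by (x - count).toNat
decreasing_by all_goals omega

def parzyste_alt (x : Int) : List Int := parzysteAltGo x 0 0

-- ===== PRECONDITION & SPEC =====
def Spec_parzyste (x : Int) (out : List Int) : Prop := out = parzyste_alt x
instance (x : Int) (out : List Int) : Decidable (Spec_parzyste x out) := by unfold Spec_parzyste; infer_instance

-- ===== CLAIM (what is proved, stated in full; the proofs are below) =====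
def Claim_equal_parzyste : Prop := ∀ (x : Int), Dom_parzyste x → Spec_parzyste x (parzyste x)

-- ===== LEMMAS AND PROOFS =====

-- From an even index j, A's remaining stream equals B's stream with count = j, k = j.
theorem parzysteGo_eq_alt (x : Int) (n : ℕ) (j : Int) (hn : (x - j).toNat = n)
    (hj : j % 2 = 0) : parzysteGo x j = parzysteAltGo x j j := by
  induction n using Nat.strong_induction_on generalizing j with
  | _ n ih =>
    rw [parzysteGo, parzysteAltGo]
    by_cases h : j < x
    · simp only [dif_pos h]
      have hj2 : (j % 2 == 0) = true := by simp [hj]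
      have hj2' : (j % 2 != 0) = false := by simp [hj]
      simp only [hj2, hj2', if_true, Bool.false_eq_true, if_false, List.append_nil,
        List.singleton_append]
      congr 1
      rw [parzysteGo]
      have hodd : (j + 1) % 2 = 1 := by omega
      have ho1 : ((j + 1) % 2 == 0) = false := by simp [hodd]
      have ho2 : ((j + 1) % 2 != 0) = true := by simp [hodd]
      by_cases h2 : j + 1 < x
      · have heq : parzysteGo x (j + 1 + 1) = parzysteAltGo x (j + 2) (j + 2) := by
          have e2 : j + 1 + 1 = j + 2 := by ring
          rw [e2]
          exact ih (x - (j + 2)).toNat (by omega) _ rfl (by omega)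
        simp [dif_pos h2, ho1, ho2, heq, -parzysteGo]
      · have hend : parzysteAltGo x (j + 1) (j + 2) = [] := by
          rw [parzysteAltGo]
          simp [h2]
        simp [dif_neg h2, ho1, ho2, hend, -parzysteGo]
    · simp [dif_neg h]

-- ===== VERDICT (by name: the statement is the Claim_ definition above) =====
theorem parzyste_spec : Claim_equal_parzyste := by
  intro x _
  unfold Spec_parzyste parzyste parzyste_alt
  exact parzysteGo_eq_alt x (x - 0).toNat 0 rfl (by decide)
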